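-- pv_equiv track=rewrite | github.com/alldayfba/nomad-nebula | execution/run_scheduled_skills.py | _field_matches
-- ===== SOURCE A (Python) =====
-- def _field_matches(expr, current, low, high, is_dow=False):
--     """Check if a single cron field matches.
--
--     Args:
--         expr: Cron field expression (e.g., "0", "*/5", "1,3,5", "1-7").
--         current: Current value to check.
--         low: Minimum valid value for this field.
--         high: Maximum valid value for this field.
--         is_dow: If True, normalize 7 to 0 (cron treats both as Sunday).
--     """
--     if expr == "*":
--         return True
--     # Handle */N
--     if expr.startswith("*/"):
--         step = int(expr[2:])
--         return current % step == 0
--     # Handle comma-separated values and ranges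
--     values = set()
--     for part in expr.split(","):
--         if "-" in part:
--             a, b = part.split("-")
--             values.update(range(int(a), int(b) + 1))
--         else:
--             values.add(int(part))
--     # In cron day-of-week, 7 is also Sunday (same as 0)
--     if is_dow and 7 in values:
--         values.add(0)
--     return current in values
-- ===== SOURCE B (Python) =====
-- def _parse_part(part):
--     """Parse one cron field part into an inclusive (lo, hi) interval."""
--     if "-" in part:
--         a, b = part.split("-")
--         return (int(a), int(b))
--     n = int(part)
--     return (n, n)
--
--
-- def _field_matches(expr, current, low, high, is_dow=False):
--     if expr == "*":
--         return True
--     if expr.startswith("*/"):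
--         return current % int(expr[2:]) == 0
--     spans = [_parse_part(p) for p in expr.split(",")]
--     targets = [current, 7] if is_dow and current == 0 else [current]
--     return any(a <= t <= b for (a, b) in spans for t in targets)
-- ===== Notes on version B (the rewrite author's own statement) =====
-- stated objective: simpler
-- what changed: A expands every part into an explicit set of all covered values (ranges enumerated element by element) and then tests membership; B never materialises that set: it parses each part into an inclusive (lo,hi) interval pair and tests interval containment against a small target list ([current], plus 7 when is_dow and current==0, mirroring A's one-directional 7-to-0 rule).
import Mathlib
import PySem

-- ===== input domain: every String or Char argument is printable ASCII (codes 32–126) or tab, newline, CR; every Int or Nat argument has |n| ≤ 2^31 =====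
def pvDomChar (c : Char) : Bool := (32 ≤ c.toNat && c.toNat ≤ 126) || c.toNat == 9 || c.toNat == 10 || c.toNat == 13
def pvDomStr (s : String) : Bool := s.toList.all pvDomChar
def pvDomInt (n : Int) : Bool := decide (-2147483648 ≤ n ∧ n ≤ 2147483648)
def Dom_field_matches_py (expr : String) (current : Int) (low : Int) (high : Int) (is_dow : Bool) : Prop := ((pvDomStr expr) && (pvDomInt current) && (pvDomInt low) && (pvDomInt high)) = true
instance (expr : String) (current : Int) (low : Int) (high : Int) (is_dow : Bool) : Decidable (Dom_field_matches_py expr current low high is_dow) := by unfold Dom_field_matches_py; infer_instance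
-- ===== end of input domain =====

-- B parses each part into an inclusive (lo,hi) interval and tests containment against a target list, instead of expanding every range into A's materialised value set (simpler decomposition).


-- ===== PORT A =====
-- one iteration of A's `for part in expr.split(",")` loop over the maintained set `values`
def pyAStep (s : PySem.Set Int) (part : String) : PySem.Set Int :=
  if PySem.Str.isIn "-" part then
    match (PySem.Str.split? part "-").getD [] with
    | [a, b] =>
      match PySem.Int.ofStr? a, PySem.Int.ofStr? b with
      | some av, some bv => PySem.Set.update s (PySem.List.pyRange av (bv + 1) 1)
      | _, _ => s          -- int() raises (ValueError); excluded by Pre_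
    | _ => s               -- `a, b = part.split("-")` raises (ValueError); excluded by Pre_
  else
    match PySem.Int.ofStr? part with
    | some n => PySem.Set.add s n
    | none => s            -- int() raises (ValueError); excluded by Pre_

-- A's `if is_dow and 7 in values: values.add(0)` reassignment
def pyDowAdjust (is_dow : Bool) (values : PySem.Set Int) : PySem.Set Int :=
  if is_dow && PySem.Set.contains values 7 then PySem.Set.add values 0 else values

def field_matches_py (expr : String) (current : Int) (low : Int) (high : Int) (is_dow : Bool) : Bool :=
  if expr = "*" then true
  else if PySem.Str.startswith expr "*/" then
    match PySem.Int.ofStr? (PySem.Str.slice expr (some 2) none) with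
    | some step => if step = 0 then false   -- ZeroDivisionError; excluded by Pre_
                   else decide (PySem.Int.mod current step = 0)
    | none => false        -- int() raises (ValueError); excluded by Pre_
  else
    PySem.Set.contains (pyDowAdjust is_dow (((PySem.Str.split? expr ",").getD []).foldl pyAStep PySem.Set.empty)) current

-- ===== PORT B =====
-- B's _parse_part: one cron part as an inclusive interval (none = int() raises; excluded by Pre_)
def parsePart? (part : String) : Option (Int × Int) :=
  if PySem.Str.isIn "-" part then
    match (PySem.Str.split? part "-").getD [] with
    | [a, b] =>
      match PySem.Int.ofStr? a, PySem.Int.ofStr? b with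
      | some av, some bv => some (av, bv)
      | _, _ => none
    | _ => none
  else (PySem.Int.ofStr? part).map (fun n => (n, n))

def field_matches_py_alt (expr : String) (current : Int) (low : Int) (high : Int) (is_dow : Bool) : Bool :=
  if expr = "*" then true
  else if PySem.Str.startswith expr "*/" then
    match PySem.Int.ofStr? (PySem.Str.slice expr (some 2) none) with
    | some step => if step = 0 then false   -- ZeroDivisionError; excluded by Pre_
                   else decide (PySem.Int.mod current step = 0)
    | none => false        -- int() raises (ValueError); excluded by Pre_
  else
    let spans := ((PySem.Str.split? expr ",").getD []).map parsePart?
    let targets := if is_dow && current == 0 then [current, 7] else [current]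
    spans.any (fun sp => targets.any (fun t =>
      match sp with
      | some (a, b) => decide (a ≤ t ∧ t ≤ b)
      | none => false))

-- ===== PRECONDITION & SPEC =====
-- a part on which int() returns normally: either `a-b` with both ends int-parsable, or a single int-parsable token
def pvPartOK (part : String) : Bool :=
  if PySem.Str.isIn "-" part then
    match (PySem.Str.split? part "-").getD [] with
    | [a, b] => (PySem.Int.ofStr? a).isSome && (PySem.Int.ofStr? b).isSome
    | _ => false
  else (PySem.Int.ofStr? part).isSome

-- Pre_ holds exactly where A returns: "*", or "*/N" with N a nonzero int (else ValueError/ZeroDivisionError),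
-- or a comma-separated list whose every part parses (else ValueError).
def Pre_field_matches_py (expr : String) (current : Int) (low : Int) (high : Int) (is_dow : Bool) : Prop :=
  expr = "*" ∨
  (PySem.Str.startswith expr "*/" = true ∧ (PySem.Int.ofStr? (PySem.Str.slice expr (some 2) none)).getD 0 ≠ 0) ∨
  (PySem.Str.startswith expr "*/" = false ∧ ((PySem.Str.split? expr ",").getD []).all pvPartOK = true)
instance (expr : String) (current : Int) (low : Int) (high : Int) (is_dow : Bool) : Decidable (Pre_field_matches_py expr current low high is_dow) := by unfold Pre_field_matches_py; infer_instance

def pvWitness_field_matches_py : String × Int × Int × Int × Bool := ("1-5,7", 0, 0, 6, true)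

def Spec_field_matches_py (expr : String) (current : Int) (low : Int) (high : Int) (is_dow : Bool) (out : Bool) : Prop := out = field_matches_py_alt expr current low high is_dow
instance (expr : String) (current : Int) (low : Int) (high : Int) (is_dow : Bool) (out : Bool) : Decidable (Spec_field_matches_py expr current low high is_dow out) := by unfold Spec_field_matches_py; infer_instance

-- ===== CLAIM (what is proved, stated in full; the proofs are below) =====
def Claim_equal_field_matches_py : Prop := ∀ (expr : String) (current : Int) (low : Int) (high : Int) (is_dow : Bool), Dom_field_matches_py expr current low high is_dow → Pre_field_matches_py expr current low high is_dow → Spec_field_matches_py expr current low high is_dow (field_matches_py expr current low high is_dow)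

-- ===== LEMMAS AND PROOFS =====

-- a well-formed part parses to an interval, and A's per-part set contribution is exactly that interval
lemma mem_pyAStep (s : PySem.Set Int) (p : String) (x : Int) (hp : pvPartOK p = true) :
    x ∈ pyAStep s p ↔ x ∈ s ∨ (∃ a b, parsePart? p = some (a, b) ∧ a ≤ x ∧ x ≤ b) := by
  unfold pyAStep parsePart? pvPartOK at *
  split_ifs at * with hdash
  · rcases hsp : (PySem.Str.split? p "-").getD [] with _ | ⟨a, _ | ⟨b, _ | _⟩⟩ <;> rw [hsp] at hp <;>
      simp_all
    obtain ⟨ha, hb⟩ := hp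
    rcases ha' : PySem.Int.ofStr? a with _ | av <;> rw [ha'] at ha <;>
      rcases hb' : PySem.Int.ofStr? b with _ | bv <;> rw [hb'] at hb <;> simp_all
  · rcases hn : PySem.Int.ofStr? p with _ | n <;>
      simp_all [PySem.Set.mem_add]
    constructor
    · rintro (h | rfl)
      · exact Or.inl h
      · exact Or.inr ⟨le_refl x, le_refl x⟩
    · rintro (h | ⟨h1, h2⟩)
      · exact Or.inl h
      · exact Or.inr (le_antisymm h2 h1)

lemma mem_foldl_pyAStep (parts : List String) (s : PySem.Set Int) (x : Int)
    (h : parts.all pvPartOK = true) :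
    x ∈ parts.foldl pyAStep s ↔
      x ∈ s ∨ ∃ p ∈ parts, ∃ a b, parsePart? p = some (a, b) ∧ a ≤ x ∧ x ≤ b := by
  induction parts generalizing s with
  | nil => simp
  | cons p rest ih =>
    simp only [List.all_cons, Bool.and_eq_true] at h
    rw [List.foldl_cons, ih _ h.2, mem_pyAStep s p x h.1]
    simp only [List.mem_cons]
    constructor
    · rintro ((hs | hc) | ⟨q, hq, hc⟩)
      · exact Or.inl hs
      · exact Or.inr ⟨p, Or.inl rfl, hc⟩
      · exact Or.inr ⟨q, Or.inr hq, hc⟩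
    · rintro (hs | ⟨q, rfl | hq, hc⟩)
      · exact Or.inl (Or.inl hs)
      · exact Or.inl (Or.inr hc)
      · exact Or.inr ⟨q, hq, hc⟩

-- ===== VERDICT (by name: the statement is the Claim_ definition above) =====
theorem field_matches_py_spec : Claim_equal_field_matches_py := by
  intro expr current low high is_dow _ hpre
  unfold Spec_field_matches_py field_matches_py field_matches_py_alt pyDowAdjust
  by_cases hstar : expr = "*"
  · rw [if_pos hstar, if_pos hstar]
  rw [if_neg hstar, if_neg hstar]
  by_cases hsl : PySem.Str.startswith expr "*/" = true
  · rw [if_pos hsl, if_pos hsl]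
  rcases hpre with h | ⟨h, _⟩ | ⟨_, hall⟩
  · exact absurd h hstar
  · exact absurd h hsl
  rw [if_neg hsl, if_neg hsl]
  rw [Bool.eq_iff_iff]
  have hmem := fun x => mem_foldl_pyAStep ((PySem.Str.split? expr ",").getD []) PySem.Set.empty x hall
  simp only [PySem.Set.empty, List.not_mem_nil, false_or] at hmem
  simp only [PySem.Set.empty]
  rw [List.any_map, List.any_eq_true]
  constructor
  · intro hL
    split_ifs at hL with h7
    · rw [PySem.Set.contains_iff, PySem.Set.mem_add, hmem] at hL
      simp only [Bool.and_eq_true, PySem.Set.contains_iff, hmem 7] at h7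
      rcases hL with ⟨p, hp, a, b, hab, h1, h2⟩ | rfl
      · refine ⟨p, hp, ?_⟩
        simp only [Function.comp, hab]
        split_ifs <;> simp <;> omega
      · obtain ⟨p, hp, a, b, hab, h1, h2⟩ := h7.2
        refine ⟨p, hp, ?_⟩
        simp only [Function.comp, hab]
        split_ifs with hdc
        · simp
          omega
        · exact absurd (by simp [h7.1]) hdc
    · rw [PySem.Set.contains_iff, hmem] at hL
      obtain ⟨p, hp, a, b, hab, h1, h2⟩ := hL
      refine ⟨p, hp, ?_⟩
      simp only [Function.comp, hab]
      split_ifs <;> simp <;> omega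
  · intro hR
    obtain ⟨p, hp, hpc⟩ := hR
    simp only [Function.comp] at hpc
    rcases hab : parsePart? p with _ | ⟨a, b⟩ <;> rw [hab] at hpc
    · simp at hpc
    rcases hd : (is_dow && current == 0) with _ | _ <;> rw [hd] at hpc <;> simp at hpc
    · split_ifs with h7
      · rw [PySem.Set.contains_iff, PySem.Set.mem_add, hmem]
        exact Or.inl ⟨p, hp, a, b, hab, hpc⟩
      · rw [PySem.Set.contains_iff, hmem]
        exact ⟨p, hp, a, b, hab, hpc⟩
    · simp only [Bool.and_eq_true, beq_iff_eq] at hd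
      rcases hpc with hc | hc7
      · split_ifs with h7
        · rw [PySem.Set.contains_iff, PySem.Set.mem_add, hmem]
          exact Or.inl ⟨p, hp, a, b, hab, hc⟩
        · rw [PySem.Set.contains_iff, hmem]
          exact ⟨p, hp, a, b, hab, hc⟩
      · have h7 : (is_dow && PySem.Set.contains (((PySem.Str.split? expr ",").getD []).foldl pyAStep []) 7) = true := by
          simp only [hd.1, Bool.true_and, PySem.Set.contains_iff, hmem 7]
          exact ⟨p, hp, a, b, hab, hc7⟩
        rw [if_pos h7, PySem.Set.contains_iff, PySem.Set.mem_add]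
        exact Or.inr hd.2
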